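-- pv_equiv track=rewrite | github.com/DanielKim0/CobaltBot | processing/eu4_country.py | sep_bracket
-- ===== SOURCE A (Python) =====
-- def sep_bracket(string):
--     parts = string.split()
--     new_parts = []
--     quote = False
--     for part in parts:
--         if quote:
--             new_parts[-1] += " " + part
--         else:
--             new_parts.append(part)
--
--         for i in range(part.count("\"")):
--             quote = not quote
--     return new_parts
-- ===== SOURCE B (Python) =====
-- def sep_bracket(string):
--     result = []
--     buf = None
--     quote = False
--     pending = False
--     for ch in string:
--         if ch.isspace():
--             if quote:
--                 pending = True
--             elif buf is not None:
--                 result.append(buf)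
--                 buf = None
--         else:
--             if buf is None:
--                 buf = ch
--             else:
--                 if pending:
--                     buf += " "
--                 buf += ch
--             pending = False
--             if ch == '"':
--                 quote = not quote
--     if buf is not None:
--         result.append(buf)
--     return result
-- ===== Notes on version B (the rewrite author's own statement) =====
-- stated objective: alternative
-- what changed: Replaced A's two-phase split-then-merge (str.split(), then a fold that re-joins consecutive parts while a quote-parity flag is set, mutating the last list element) by a single character-level scan that maintains a token buffer, a quote flag and a pending-space flag and never builds the intermediate word list.
import Mathlib
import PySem

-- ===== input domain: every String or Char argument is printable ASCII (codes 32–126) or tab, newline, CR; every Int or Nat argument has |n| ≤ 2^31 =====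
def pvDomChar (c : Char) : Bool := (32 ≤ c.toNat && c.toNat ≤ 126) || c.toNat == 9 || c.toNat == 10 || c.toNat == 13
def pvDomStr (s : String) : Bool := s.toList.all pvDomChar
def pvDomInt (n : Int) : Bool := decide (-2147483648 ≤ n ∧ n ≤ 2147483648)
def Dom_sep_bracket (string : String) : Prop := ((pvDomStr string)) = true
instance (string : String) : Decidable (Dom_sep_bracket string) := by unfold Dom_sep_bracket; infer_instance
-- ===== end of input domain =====

-- B replaces A's split-then-merge (whitespace split, then re-joining quoted spans) with a single
-- character-level scan keeping a buffer, a quote flag and a pending-space flag; same return value.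

-- ===== PORT A =====
-- new_parts[-1] += " " + part  (on [] Python would raise IndexError; that branch is unreachable,
-- since quote = true only after at least one part has been appended)
def pvAddLast (l : List (List Char)) (s : List Char) : List (List Char) :=
  match l with
  | [] => []
  | _ :: _ => l.dropLast ++ [l.getLast! ++ s]

-- one iteration of A's `for part in parts` body, state = (new_parts, quote)
def pvStepA (st : List (List Char) × Bool) (part : List Char) : List (List Char) × Bool :=
  let np := if st.2 then pvAddLast st.1 (' ' :: part) else st.1 ++ [part]
  -- for i in range(part.count('"')): quote = not quote
  let q := (PySem.List.pyRange 0 ((PySem.Chars.count part ['"'] : Nat) : Int) 1).foldl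
             (fun q _ => !q) st.2
  (np, q)

def sep_bracket (string : String) : List String :=
  (((PySem.Chars.split₀ string.toList).foldl pvStepA ([], false)).1).map String.ofList

-- ===== PORT B =====
-- Source B's loop: result, buffer (none = no open token), quote flag, pending-space flag
def pvGoB (cs : List Char) (res : List (List Char)) (buf : Option (List Char))
    (quote : Bool) (pending : Bool) : List (List Char) :=
  match cs with
  | [] => match buf with
          | none => res
          | some b => res ++ [b]
  | c :: rest =>
    if PySem.Chars.isspace c then
      if quote then pvGoB rest res buf quote true
      else match buf with
           | some b => pvGoB rest (res ++ [b]) none quote false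
           | none => pvGoB rest res buf quote false
    else
      let b' := match buf with
                | none => [c]
                | some b => (if pending then b ++ [' '] else b) ++ [c]
      pvGoB rest res (some b') (if c = '"' then !quote else quote) false

def sep_bracket_alt (string : String) : List String :=
  (pvGoB string.toList [] none false false).map String.ofList

-- ===== PRECONDITION & SPEC =====
def Spec_sep_bracket (string : String) (out : List String) : Prop := out = sep_bracket_alt string
instance (string : String) (out : List String) : Decidable (Spec_sep_bracket string out) := by unfold Spec_sep_bracket; infer_instance

-- ===== CLAIM (what is proved, stated in full; the proofs are below) =====
def Claim_equal_sep_bracket : Prop := ∀ (string : String), Dom_sep_bracket string → Spec_sep_bracket string (sep_bracket string)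

-- ===== LEMMAS AND PROOFS =====

-- counting the single-character pattern '"' is List.count
lemma pvCountGo (l : List Char) (fuel acc : Nat) (h : l.length ≤ fuel) :
    PySem.Chars.count.go ['"'] fuel l acc = acc + l.count '"' := by
  induction l generalizing fuel acc with
  | nil => cases fuel <;> simp [PySem.Chars.count.go]
  | cons c t ih =>
    cases fuel with
    | zero => simp at h
    | succ f =>
      simp only [List.length_cons] at h
      by_cases hc : c = '"'
      · simp [PySem.Chars.count.go, List.isPrefixOf, hc, ih f (acc+1) (by omega)]
        omega
      · simp [PySem.Chars.count.go, List.isPrefixOf, hc, ih f acc (by omega)]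
        exact fun h' => absurd h'.symm hc

lemma pvCountQuote (cs : List Char) :
    PySem.Chars.count cs ['"'] = cs.count '"' := by
  simp [PySem.Chars.count, pvCountGo cs cs.length 0 (le_refl _)]

-- `for _ in range(n): q = not q` is parity
lemma pvFoldNot (l : List Int) (q : Bool) :
    l.foldl (fun q _ => !q) q = (q ^^ decide (l.length % 2 = 1)) := by
  induction l generalizing q with
  | nil => simp
  | cons x xs ih =>
    simp only [List.foldl, ih, List.length_cons]
    cases q <;> rcases Nat.mod_two_eq_zero_or_one xs.length with h | h <;>
      simp [Nat.add_mod, h]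

-- quote state after A's inner toggle loop
lemma pvToggle (part : List Char) (q : Bool) :
    (PySem.List.pyRange 0 ((PySem.Chars.count part ['"'] : Nat) : Int) 1).foldl
      (fun q _ => !q) q = (q ^^ decide (part.count '"' % 2 = 1)) := by
  rw [show PySem.List.pyRange 0 ((PySem.Chars.count part ['"'] : Nat) : Int) 1
      = PySem.List.pyRange 0 ((PySem.Chars.count part ['"'] : Nat) : Int) from rfl,
    PySem.List.pyRange_zero_natCast, pvFoldNot]
  simp [pvCountQuote]

-- split₀.go's accumulator comes out in front
lemma pvGoAcc (cs : List Char) : ∀ cur acc,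
    PySem.Chars.split₀.go cs cur acc = acc.reverse ++ PySem.Chars.split₀.go cs cur [] := by
  induction cs with
  | nil => intro cur acc; by_cases h : cur.isEmpty <;> simp [PySem.Chars.split₀.go, h]
  | cons c rest ih =>
    intro cur acc
    by_cases hs : PySem.Chars.isspace c
    · by_cases h : cur.isEmpty
      · simp only [PySem.Chars.split₀.go, hs, h, if_pos]
        rw [ih [] acc]
      · simp only [PySem.Chars.split₀.go, hs, h, if_pos, if_neg, Bool.false_eq_true,
          not_false_iff]
        rw [ih [] (cur.reverse :: acc), ih [] [cur.reverse]]
        simp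
    · simp only [PySem.Chars.split₀.go, hs, Bool.false_eq_true, if_neg, not_false_iff]
      rw [ih (c :: cur) acc]

lemma pvAddLast_concat (l : List (List Char)) (a s : List Char) :
    pvAddLast (l ++ [a]) s = l ++ [a ++ s] := by
  cases l with
  | nil => simp [pvAddLast]
  | cons x xs =>
    simp only [List.cons_append, pvAddLast]
    simp only [List.getLast!]
    rw [List.dropLast_cons_of_ne_nil (by simp), List.dropLast_concat]
    simp

-- B's scan state as a function of A's fold state (new_parts, quote) and the open word cur
def pvRes (np : List (List Char)) (q : Bool) : List (List Char) :=
  if q then np.dropLast else np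
def pvBuf (np : List (List Char)) (q : Bool) (cur : List Char) : Option (List Char) :=
  if q then some (np.getLast! ++ if cur.isEmpty then [] else ' ' :: cur.reverse)
  else if cur.isEmpty then none else some cur.reverse

-- the invariant: B's scan from the related state equals A's fold over the remaining split
lemma pvMain (rest : List Char) : ∀ (np : List (List Char)) (q : Bool) (cur : List Char),
    (q = true → np ≠ []) →
    pvGoB rest (pvRes np q) (pvBuf np q cur) (q ^^ decide (cur.count '"' % 2 = 1))
        (q && cur.isEmpty)
      = (List.foldl pvStepA (np, q) (PySem.Chars.split₀.go rest cur [])).1 := by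
  induction rest with
  | nil =>
    intro np q cur hnp
    cases q with
    | false =>
      by_cases h : cur.isEmpty
      · simp [pvGoB, pvRes, pvBuf, PySem.Chars.split₀.go, h]
      · simp [pvGoB, pvRes, pvBuf, PySem.Chars.split₀.go, h, pvStepA]
    | true =>
      rcases List.eq_nil_or_concat np with rfl | ⟨l, a, rfl⟩
      · exact absurd rfl (hnp rfl)
      · by_cases h : cur.isEmpty
        · simp [pvGoB, pvRes, pvBuf, PySem.Chars.split₀.go, h]
        · simp [pvGoB, pvRes, pvBuf, PySem.Chars.split₀.go, h, pvStepA, pvAddLast_concat]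
  | cons c rest ih =>
    intro np q cur hnp
    by_cases hs : PySem.Chars.isspace c
    · by_cases h : cur.isEmpty
      · -- cur = [], whitespace: A skips, B idles (in quote: marks a pending space)
        rw [List.isEmpty_iff] at h
        subst h
        cases q with
        | false =>
          simp only [PySem.Chars.split₀.go, hs, if_pos, List.isEmpty_nil]
          have := ih np false [] (by simp)
          simp [pvGoB, pvBuf, hs] at this ⊢
          exact this
        | true =>
          simp only [PySem.Chars.split₀.go, hs, if_pos, List.isEmpty_nil]
          have := ih np true [] hnp
          simp [pvGoB, pvBuf, hs] at this ⊢
          exact this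
      · -- cur ≠ [], whitespace: the word completes on both sides
        simp only [PySem.Chars.split₀.go, hs, if_pos, h, Bool.false_eq_true, if_neg,
          not_false_iff]
        rw [pvGoAcc rest [] [cur.reverse]]
        simp only [List.reverse_cons, List.reverse_nil, List.nil_append, List.singleton_append,
          List.foldl_cons]
        cases q with
        | false =>
          have hstep : pvStepA (np, false) cur.reverse
              = (np ++ [cur.reverse], decide (cur.count '"' % 2 = 1)) := by
            simp [pvStepA, pvToggle]
          rw [hstep]
          by_cases hq' : decide (cur.count '"' % 2 = 1) = true
          · -- quote now open: B keeps the buffer, sets pending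
            have := ih (np ++ [cur.reverse]) true [] (by simp)
            simp [pvGoB, pvRes, pvBuf, hs, h, hq'] at this ⊢
            exact this
          · have := ih (np ++ [cur.reverse]) false [] (by simp)
            simp only [Bool.not_eq_true] at hq'
            simp [pvGoB, pvRes, pvBuf, hs, h, hq'] at this ⊢
            exact this
        | true =>
          rcases List.eq_nil_or_concat np with rfl | ⟨l, a, rfl⟩
          · exact absurd rfl (hnp rfl)
          simp only [List.concat_eq_append]
          have hstep : pvStepA (l ++ [a], true) cur.reverse
              = (l ++ [a ++ ' ' :: cur.reverse], !decide (cur.count '"' % 2 = 1)) := by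
            simp [pvStepA, pvToggle, pvAddLast_concat]
          rw [hstep]
          by_cases hq' : decide (cur.count '"' % 2 = 1) = true
          · -- parity odd: quote turns off, B flushes the merged token
            have := ih (l ++ [a ++ ' ' :: cur.reverse]) false [] (by simp)
            simp [pvGoB, pvRes, pvBuf, hs, h, hq'] at this ⊢
            exact this
          · have := ih (l ++ [a ++ ' ' :: cur.reverse]) true [] (by simp)
            simp only [Bool.not_eq_true] at hq'
            simp [pvGoB, pvRes, pvBuf, hs, h, hq'] at this ⊢
            exact this
    · -- non-space character: extends the open word on both sides
      simp only [PySem.Chars.split₀.go, hs, Bool.false_eq_true, if_neg, not_false_iff]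
      have := ih np q (c :: cur) hnp
      have hcnt : decide ((c :: cur).count '"' % 2 = 1)
          = (decide (c = '"') ^^ decide (cur.count '"' % 2 = 1)) := by
        by_cases hc : c = '"' <;>
          rcases Nat.mod_two_eq_zero_or_one (cur.count '"') with hp | hp <;>
          simp [hc, hp, Nat.add_mod]
      cases q with
      | false =>
        by_cases h : cur.isEmpty
        · rw [List.isEmpty_iff] at h; subst h
          simp [pvGoB, pvRes, pvBuf, hs, hcnt] at this ⊢
          by_cases hc : c = '"' <;> simp [hc] at this ⊢ <;> exact this
        · simp [pvGoB, pvRes, pvBuf, hs, h, hcnt] at this ⊢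
          by_cases hc : c = '"' <;> simp [hc] at this ⊢ <;> exact this
      | true =>
        by_cases h : cur.isEmpty
        · rw [List.isEmpty_iff] at h; subst h
          simp [pvGoB, pvRes, pvBuf, hs, hcnt] at this ⊢
          by_cases hc : c = '"' <;> simp [hc] at this ⊢ <;> exact this
        · simp [pvGoB, pvRes, pvBuf, hs, h, hcnt] at this ⊢
          by_cases hc : c = '"' <;> simp [hc] at this ⊢ <;> exact this

-- ===== VERDICT (by name: the statement is the Claim_ definition above) =====
theorem sep_bracket_spec : Claim_equal_sep_bracket := by
  intro s _
  unfold Spec_sep_bracket sep_bracket sep_bracket_alt PySem.Chars.split₀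
  rw [← pvMain s.toList [] false [] (by simp)]
  rfl
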